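-- pv_equiv track=rewrite | github.com/davidl71/exarp-go | scripts/phase3_split.py | annotate_body
-- ===== SOURCE A (Python) =====
-- SEP_W = 79  # separator line width (chars)
--
-- def make_sep(name):
--     """Return a single-line separator: // ─── name ────────... (SEP_W chars)."""
--     prefix = f"// ─── {name} "
--     return prefix + "─" * max(2, SEP_W - len(prefix)) + "\n"
--
-- def annotate_body(chunk_lines, funcs):
--     """
--     Insert a section separator before each top-level declaration (before
--     its doc comment when present).  Returns annotated body as a string.
--     """
--     sep_at = {sep_idx: name for sep_idx, name, _ in funcs}
--     out = []
--     for i, line in enumerate(chunk_lines):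
--         if i in sep_at:
--             out.append(make_sep(sep_at[i]))
--         out.append(line)
--     return "".join(out)
-- ===== SOURCE B (Python) =====
-- SEP_W = 79  # separator line width (chars)
--
-- def make_sep(name):
--     """Return a single-line separator: // ─── name ────────... (SEP_W chars)."""
--     prefix = f"// ─── {name} "
--     return prefix + "─" * max(2, SEP_W - len(prefix)) + "\n"
--
-- def annotate_body(chunk_lines, funcs):
--     """Insert a section separator before each top-level declaration.
--
--     Boundary-driven: keep the last name per in-range index, walk the sorted
--     boundaries and emit whole slices between them instead of testing every line.
--     """
--     n = len(chunk_lines)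
--     bounds = {}
--     for idx, name, _ in funcs:
--         if 0 <= idx < n:
--             bounds[idx] = name
--     pieces = []
--     prev = 0
--     for idx in sorted(bounds):
--         pieces.append("".join(chunk_lines[prev:idx]))
--         pieces.append(make_sep(bounds[idx]))
--         prev = idx
--     pieces.append("".join(chunk_lines[prev:]))
--     return "".join(pieces)
-- ===== Notes on version B (the rewrite author's own statement) =====
-- stated objective: faster
-- what changed: Replaces the per-line scan with a dict membership test by a boundary walk: keep the last name per in-range index, sort the surviving indices, and emit whole slices between consecutive boundaries.
import Mathlib
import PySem

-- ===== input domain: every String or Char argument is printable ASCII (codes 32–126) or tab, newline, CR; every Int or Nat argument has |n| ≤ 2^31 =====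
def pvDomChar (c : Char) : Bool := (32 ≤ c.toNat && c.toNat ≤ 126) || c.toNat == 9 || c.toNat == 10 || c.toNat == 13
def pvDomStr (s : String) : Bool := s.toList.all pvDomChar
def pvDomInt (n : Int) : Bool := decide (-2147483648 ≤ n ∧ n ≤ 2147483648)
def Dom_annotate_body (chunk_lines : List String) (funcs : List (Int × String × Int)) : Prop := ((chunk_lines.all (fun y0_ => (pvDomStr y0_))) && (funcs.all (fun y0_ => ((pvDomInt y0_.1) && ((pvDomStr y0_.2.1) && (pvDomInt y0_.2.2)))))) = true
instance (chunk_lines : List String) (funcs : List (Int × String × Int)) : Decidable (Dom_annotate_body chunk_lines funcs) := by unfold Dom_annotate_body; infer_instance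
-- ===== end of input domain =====

-- B replaces A's per-line scan by a boundary walk over the sorted in-range declaration
-- indices, emitting whole slices between consecutive boundaries (alternative decomposition).

-- shared helper: both Pythons define the same make_sep (Python len counts code points)
def make_sep (name : String) : String :=
  let prefixChars : List Char := "// ─── ".toList ++ name.toList ++ [' ']
  String.ofList (prefixChars ++ List.replicate (max 2 (79 - prefixChars.length)) '─' ++ ['\n'])

-- ===== PORT A =====
def annotate_body (chunk_lines : List String) (funcs : List (Int × String × Int)) : String :=
  let sep_at : PySem.Dict Int String :=
    funcs.foldl (fun d f => d.insert f.1 f.2.1) PySem.Dict.empty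
  let out : List String :=
    (PySem.List.enumerate chunk_lines).foldl
      (fun acc p =>
        (if sep_at.contains p.1 then acc ++ [make_sep (sep_at.getD p.1 "")] else acc) ++ [p.2])
      []
  PySem.Str.join "" out

-- ===== PORT B =====
def annotate_body_alt (chunk_lines : List String) (funcs : List (Int × String × Int)) : String :=
  let n : Int := chunk_lines.length
  let bounds : PySem.Dict Int String :=
    funcs.foldl (fun d f => if 0 ≤ f.1 ∧ f.1 < n then d.insert f.1 f.2.1 else d) PySem.Dict.empty
  let st :=
    (PySem.List.sorted bounds.keys (fun k => k)).foldl
      (fun (st : List String × Int) idx =>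
        (st.1 ++ [PySem.Str.join "" (PySem.List.slice chunk_lines (some st.2) (some idx)),
                  make_sep (bounds.getD idx "")], idx))
      ([], 0)
  PySem.Str.join "" (st.1 ++ [PySem.Str.join "" (PySem.List.slice chunk_lines (some st.2) none)])

-- ===== PRECONDITION & SPEC =====
def Spec_annotate_body (chunk_lines : List String) (funcs : List (Int × String × Int)) (out : String) : Prop := out = annotate_body_alt chunk_lines funcs
instance (chunk_lines : List String) (funcs : List (Int × String × Int)) (out : String) : Decidable (Spec_annotate_body chunk_lines funcs out) := by unfold Spec_annotate_body; infer_instance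

-- ===== CLAIM (what is proved, stated in full; the proofs are below) =====
def Claim_equal_annotate_body : Prop := ∀ (chunk_lines : List String) (funcs : List (Int × String × Int)), Dom_annotate_body chunk_lines funcs → Spec_annotate_body chunk_lines funcs (annotate_body chunk_lines funcs)

-- ===== LEMMAS AND PROOFS =====

-- flat character content of a list of strings
def catS (l : List String) : List Char := (l.map String.toList).flatten

theorem catS_nil : catS [] = [] := rfl

theorem catS_cons (x : String) (l : List String) : catS (x :: l) = x.toList ++ catS l := by
  simp [catS]

theorem catS_append (a b : List String) : catS (a ++ b) = catS a ++ catS b := by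
  simp [catS]

theorem intercalate_nil_flatten (ls : List (List Char)) : [].intercalate ls = ls.flatten := by
  induction ls with
  | nil => simp [List.intercalate]
  | cons a t ih =>
    cases t with
    | nil => simp [List.intercalate]
    | cons b t2 =>
      simp only [List.intercalate, List.intersperse] at *
      simpa using ih

theorem toList_joinS (l : List String) : (PySem.Str.join "" l).toList = catS l := by
  rw [PySem.Str.toList_join]
  have h : ("" : String).toList = [] := rfl
  rw [h, show PySem.Chars.join [] (l.map String.toList) = [].intercalate (l.map String.toList) from rfl,
    intercalate_nil_flatten]
  rfl

theorem catS_drop (cl : List String) (p : Nat) (hp : p < cl.length) :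
    catS (cl.drop p) = cl[p].toList ++ catS (cl.drop (p + 1)) := by
  rw [List.drop_eq_getElem_cons hp, catS_cons]

-- the per-line scan result as a list of strings, parametric in the dict
def segs (d : PySem.Dict Int String) : List String → Int → List String
  | [], _ => []
  | l :: ls, i =>
      (if d.contains i then [make_sep (d.getD i ""), l] else [l]) ++ segs d ls (i + 1)

-- A's loop is the scan
theorem A_foldl_eq_segs (d : PySem.Dict Int String) (ls : List String) (s : Int) (acc : List String) :
    (PySem.List.enumerate ls s).foldl
      (fun acc p =>
        (if d.contains p.1 then acc ++ [make_sep (d.getD p.1 "")] else acc) ++ [p.2]) acc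
    = acc ++ segs d ls s := by
  induction ls generalizing s acc with
  | nil => simp [PySem.List.enumerate_nil, segs]
  | cons l t ih =>
    rw [PySem.List.enumerate_cons]
    simp only [List.foldl_cons]
    rw [ih]
    by_cases h : d.contains s
    · simp [segs, h]
    · simp [segs, h]

-- get? of an insert-loop: last matching element wins, else the base dict
theorem get?_foldl_insert (l : List (Int × String × Int)) (d : PySem.Dict Int String) (k : Int) :
    (l.foldl (fun d f => d.insert f.1 f.2.1) d).get? k
      = (match (l.filter (fun f => decide (f.1 = k))).getLast? with
         | some f => some f.2.1
         | none => d.get? k) := by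
  induction l generalizing d with
  | nil => simp
  | cons f t ih =>
    simp only [List.foldl_cons, List.filter_cons]
    rw [ih]
    by_cases hk : f.1 = k
    · simp only [hk, decide_true, if_true]
      cases hft : (t.filter (fun f => decide (f.1 = k))).getLast? with
      | some g => simp [List.getLast?_cons, hft]
      | none =>
        have h0 : t.filter (fun f => decide (f.1 = k)) = [] := List.getLast?_eq_none_iff.mp hft
        simp [List.getLast?_cons, h0]
    · simp only [hk, decide_false]
      cases hft : (t.filter (fun f => decide (f.1 = k))).getLast? with
      | some g => simp [hft]
      | none =>
        simp only [hft, if_neg (by simp : ¬ (false = true))]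
        rw [PySem.Dict.get?_insert]
        rw [if_neg (fun h => hk h.symm)]

-- the full dict and the range-restricted dict agree on in-range keys
theorem get?_full_eq_bounds (funcs : List (Int × String × Int)) (n k : Int)
    (hk : 0 ≤ k ∧ k < n) :
    (funcs.foldl (fun d f => d.insert f.1 f.2.1) PySem.Dict.empty).get? k
      = (funcs.foldl (fun d f => if 0 ≤ f.1 ∧ f.1 < n then d.insert f.1 f.2.1 else d)
          PySem.Dict.empty).get? k := by
  rw [PySem.List.foldl_ite_eq_foldl_filter
        (p := fun (f : Int × String × Int) => 0 ≤ f.1 ∧ f.1 < n)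
        (f := fun (d : PySem.Dict Int String) (f : Int × String × Int) => d.insert f.1 f.2.1)
        (l := funcs) (init := PySem.Dict.empty)]
  rw [get?_foldl_insert, get?_foldl_insert, List.filter_filter]
  have hfe : (fun (f : Int × String × Int) => decide (f.1 = k) && decide (0 ≤ f.1 ∧ f.1 < n))
      = fun f => decide (f.1 = k) := by
    funext f
    by_cases h : f.1 = k
    · simp [h, hk.1, hk.2]
    · simp [h]
  rw [hfe]

theorem segs_congr (d d' : PySem.Dict Int String) (ls : List String) (s : Int)
    (h : ∀ i : Int, s ≤ i → i < s + ls.length → d.get? i = d'.get? i) :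
    segs d ls s = segs d' ls s := by
  induction ls generalizing s with
  | nil => rfl
  | cons l t ih =>
    have hs : d.get? s = d'.get? s := by
      apply h s le_rfl
      simp only [List.length_cons]
      push_cast
      omega
    simp only [segs]
    rw [PySem.Dict.contains_eq_isSome_get?, PySem.Dict.contains_eq_isSome_get?, hs,
      PySem.Dict.getD_eq_get?_getD, PySem.Dict.getD_eq_get?_getD, hs,
      ih (s + 1) (by intro i h1 h2; apply h i (by omega); simp only [List.length_cons] at h2 ⊢; push_cast at h2 ⊢; omega)]

theorem segs_none (d : PySem.Dict Int String) (ls : List String) (s : Int)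
    (h : ∀ i : Int, s ≤ i → i < s + ls.length → d.get? i = none) :
    segs d ls s = ls := by
  induction ls generalizing s with
  | nil => rfl
  | cons l t ih =>
    have hs : d.get? s = none := by
      apply h s le_rfl
      simp only [List.length_cons]
      push_cast
      omega
    simp only [segs]
    rw [PySem.Dict.contains_eq_isSome_get?, hs]
    simp only [Option.isSome_none, if_neg (by simp : ¬ (false = true))]
    rw [ih (s + 1) (by intro i h1 h2; apply h i (by omega); simp only [List.length_cons] at h2 ⊢; push_cast at h2 ⊢; omega)]
    rfl

theorem segs_append (d : PySem.Dict Int String) (a b : List String) (s : Int) :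
    segs d (a ++ b) s = segs d a s ++ segs d b (s + a.length) := by
  induction a generalizing s with
  | nil => simp [segs]
  | cons l t ih =>
    simp only [List.cons_append, segs, ih (s + 1)]
    have h1 : s + 1 + (t.length : Int) = s + ((t.length : Int) + 1) := by ring
    simp [h1]

-- B's fold unrolled into its piece list
def piecesList (cl : List String) (d : PySem.Dict Int String) : List Int → Int → List String
  | [], p => [PySem.Str.join "" (PySem.List.slice cl (some p) none)]
  | k :: ks, p =>
      PySem.Str.join "" (PySem.List.slice cl (some p) (some k))
        :: make_sep (d.getD k "") :: piecesList cl d ks k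

theorem B_foldl_eq_pieces (cl : List String) (d : PySem.Dict Int String)
    (ks : List Int) (acc : List String) (p : Int) :
    (ks.foldl
        (fun (st : List String × Int) idx =>
          (st.1 ++ [PySem.Str.join "" (PySem.List.slice cl (some st.2) (some idx)),
                    make_sep (d.getD idx "")], idx)) (acc, p)).1
      ++ [PySem.Str.join "" (PySem.List.slice cl
            (some (ks.foldl
              (fun (st : List String × Int) idx =>
                (st.1 ++ [PySem.Str.join "" (PySem.List.slice cl (some st.2) (some idx)),
                          make_sep (d.getD idx "")], idx)) (acc, p)).2) none)]
    = acc ++ piecesList cl d ks p := by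
  induction ks generalizing acc p with
  | nil => simp [piecesList]
  | cons k t ih =>
    simp only [List.foldl_cons, piecesList]
    rw [ih]
    simp

-- peel the first line off the remaining pieces
theorem pieces_peel (cl : List String) (d : PySem.Dict Int String)
    (ks : List Int) (p : Nat) (hp : p < cl.length)
    (hks : ∀ k ∈ ks, (p : Int) < k) :
    catS (piecesList cl d ks (p : Int))
      = cl[p].toList ++ catS (piecesList cl d ks ((p + 1 : Nat) : Int)) := by
  cases ks with
  | nil =>
    simp only [piecesList, catS_cons, catS_nil, toList_joinS, PySem.List.slice_from_natCast]
    rw [catS_drop cl p hp]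
    simp
  | cons k t =>
    have hk0 : (p : Int) < k := hks k (by simp)
    obtain ⟨kn, rfl⟩ : ∃ kn : Nat, k = (kn : Int) := ⟨k.toNat, by omega⟩
    have hpk : p < kn := by omega
    simp only [piecesList, catS_cons, toList_joinS]
    rw [PySem.List.slice_natCast, PySem.List.slice_natCast]
    have htake : List.take (kn - p) (List.drop p cl)
        = cl[p] :: List.take (kn - (p + 1)) (List.drop (p + 1) cl) := by
      rw [List.drop_eq_getElem_cons hp]
      have h1 : kn - p = (kn - (p + 1)) + 1 := by omega
      rw [h1, List.take_succ_cons]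
    rw [htake, catS_cons]
    simp

-- core: the boundary walk has the same characters as the per-line scan
theorem pieces_eq_segs (cl : List String) (d : PySem.Dict Int String)
    (ks : List Int) (prev : Nat) (hprev : prev ≤ cl.length)
    (hsort : ks.Pairwise (· < ·))
    (hrange : ∀ k ∈ ks, (prev : Int) ≤ k ∧ k < (cl.length : Int))
    (hiff : ∀ i : Nat, prev ≤ i → i < cl.length → ((d.get? i).isSome ↔ (i : Int) ∈ ks)) :
    catS (piecesList cl d ks (prev : Int)) = catS (segs d (cl.drop prev) (prev : Int)) := by
  induction ks generalizing prev with
  | nil =>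
    rw [segs_none]
    · simp only [piecesList, catS_cons, catS_nil, toList_joinS, PySem.List.slice_from_natCast]
      simp
    · intro i h1 h2
      have hlen : ((cl.drop prev).length : Int) = (cl.length : Int) - prev := by
        simp only [List.length_drop]
        omega
      have hint : i = ((i.toNat : Nat) : Int) := by omega
      have h1' : prev ≤ i.toNat := by omega
      have h2' : i.toNat < cl.length := by rw [hlen] at h2; omega
      have hm := hiff i.toNat h1' h2'
      simp only [List.not_mem_nil, iff_false] at hm
      rw [hint]
      exact Option.not_isSome_iff_eq_none.mp hm
  | cons k t ih =>
    have hk := hrange k (by simp)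
    obtain ⟨kn, rfl⟩ : ∃ kn : Nat, k = (kn : Int) := ⟨k.toNat, by omega⟩
    have hpk : prev ≤ kn := by omega
    have hklen : kn < cl.length := by omega
    have hts : t.Pairwise (· < ·) := (List.pairwise_cons.mp hsort).2
    have htgt := (List.pairwise_cons.mp hsort).1
    -- split the scanned region at k
    have hsplit : cl.drop prev
        = List.take (kn - prev) (cl.drop prev) ++ cl.drop kn := by
      have h1 : cl.drop kn = List.drop (kn - prev) (cl.drop prev) := by
        rw [List.drop_drop]
        congr 1
        omega
      rw [h1, List.take_append_drop]
    have hlen1 : (List.take (kn - prev) (cl.drop prev)).length = kn - prev := by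
      simp
      omega
    conv_rhs => rw [hsplit]
    rw [segs_append, hlen1]
    -- the first chunk has no separators
    have hchunk : segs d (List.take (kn - prev) (cl.drop prev)) (prev : Int)
        = List.take (kn - prev) (cl.drop prev) := by
      apply segs_none
      intro i h1 h2
      rw [hlen1] at h2
      have hint : i = ((i.toNat : Nat) : Int) := by omega
      have h1' : prev ≤ i.toNat := by omega
      have h2' : i.toNat < cl.length := by omega
      have hmem := hiff i.toNat h1' h2'
      have hnot : ((i.toNat : Nat) : Int) ∉ ((kn : Nat) : Int) :: t := by
        intro hm
        rcases List.mem_cons.mp hm with hm | hm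
        · omega
        · have := htgt _ hm
          omega
      simp only [hnot, iff_false] at hmem
      rw [hint]
      exact Option.not_isSome_iff_eq_none.mp hmem
    rw [hchunk]
    -- at k a separator is emitted
    have hcontains : d.contains ((kn : Nat) : Int) = true := by
      rw [PySem.Dict.contains_eq_isSome_get?]
      have := (hiff kn hpk hklen).mpr (by simp)
      simpa using this
    have hdropk : cl.drop kn = cl[kn] :: cl.drop (kn + 1) :=
      List.drop_eq_getElem_cons hklen
    have hsegk : segs d (cl.drop kn) ((prev : Int) + ((kn - prev : Nat) : Int))
        = [make_sep (d.getD ((kn : Nat) : Int) ""), cl[kn]]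
            ++ segs d (cl.drop (kn + 1)) (((kn + 1 : Nat) : Int)) := by
      have harg : (prev : Int) + ((kn - prev : Nat) : Int) = ((kn : Nat) : Int) := by
        omega
      rw [harg, hdropk]
      simp only [segs, hcontains, if_true]
      norm_cast
    rw [hsegk]
    -- left side: unfold piecesList, peel line k, apply IH at prev := kn + 1
    have hiff' : ∀ i : Nat, kn + 1 ≤ i → i < cl.length → ((d.get? i).isSome ↔ (i : Int) ∈ t) := by
      intro i h1 h2
      have h0 := hiff i (by omega) h2
      have hne : (i : Int) ≠ ((kn : Nat) : Int) := by omega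
      rw [List.mem_cons] at h0
      constructor
      · intro hs
        rcases h0.mp hs with hm | hm
        · exact absurd hm hne
        · exact hm
      · intro hm
        exact h0.mpr (Or.inr hm)
    have ihk := ih (kn + 1) (by omega) hts
      (fun k' hk' => ⟨by have := htgt k' hk'; omega, (hrange k' (by simp [hk'])).2⟩)
      hiff'
    have hpeel := pieces_peel cl d t kn hklen
      (fun k' hk' => by have := htgt k' hk'; omega)
    simp only [piecesList, catS_cons, toList_joinS]
    rw [hpeel, ihk]
    rw [PySem.List.slice_natCast]
    simp [catS_append, catS_cons]

-- ===== VERDICT (by name: the statement is the Claim_ definition above) =====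
theorem annotate_body_spec : Claim_equal_annotate_body := by
  intro cl fs _
  unfold Spec_annotate_body annotate_body annotate_body_alt
  simp only []
  set sep_at := fs.foldl (fun d f => d.insert f.1 f.2.1) PySem.Dict.empty with hsa
  set bounds := fs.foldl
      (fun d f => if 0 ≤ f.1 ∧ f.1 < (cl.length : Int) then d.insert f.1 f.2.1 else d)
      PySem.Dict.empty with hbd
  set ks := PySem.List.sorted bounds.keys (fun k => k) with hks
  rw [A_foldl_eq_segs, B_foldl_eq_pieces]
  simp only [List.nil_append]
  apply String.toList_inj.mp
  rw [toList_joinS, toList_joinS]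
  have hnodupb : bounds.keys.Nodup := by
    rw [hbd, PySem.List.foldl_ite_eq_foldl_filter
          (p := fun (f : Int × String × Int) => 0 ≤ f.1 ∧ f.1 < (cl.length : Int))
          (f := fun (d : PySem.Dict Int String) (f : Int × String × Int) => d.insert f.1 f.2.1)
          (l := fs) (init := PySem.Dict.empty)]
    exact PySem.Dict.nodup_keys_foldl_insert_key _ (fun (f : Int × String × Int) => f.1) (fun (_ : PySem.Dict Int String) (f : Int × String × Int) => f.2.1) _ (by simp)
  have hperm := PySem.List.sorted_perm bounds.keys (fun k => k) false
  have hmemks : ∀ x : Int, x ∈ ks ↔ x ∈ bounds.keys := fun x => hperm.mem_iff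
  have hnodupks : ks.Nodup := hperm.nodup_iff.mpr hnodupb
  have hle : ks.Pairwise (fun a b => a ≤ b) := PySem.List.sorted_pairwise bounds.keys (fun k => k)
  have hsort : ks.Pairwise (· < ·) := by
    have h := hle.and hnodupks
    exact h.imp (fun h => lt_of_le_of_ne h.1 h.2)
  have hkeysmem : ∀ x : Int, x ∈ bounds.keys → 0 ≤ x ∧ x < (cl.length : Int) := by
    intro x hx
    rw [hbd, PySem.List.foldl_ite_eq_foldl_filter
          (p := fun (f : Int × String × Int) => 0 ≤ f.1 ∧ f.1 < (cl.length : Int))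
          (f := fun (d : PySem.Dict Int String) (f : Int × String × Int) => d.insert f.1 f.2.1)
          (l := fs) (init := PySem.Dict.empty),
      PySem.Dict.keys_foldl_insert_key _ (fun (f : Int × String × Int) => f.1) (fun (_ : PySem.Dict Int String) (f : Int × String × Int) => f.2.1)] at hx
    have hx2 : x ∈ (fs.filter
        (fun f => decide (0 ≤ f.1 ∧ f.1 < (cl.length : Int)))).map (fun f => f.1) := by
      have h0 : PySem.Dict.keys (PySem.Dict.empty (κ := Int) (ν := String)) = [] := by simp
      rw [h0] at hx
      exact (PySem.Set.mem_ofList _ _).mp hx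
    rcases List.mem_map.mp hx2 with ⟨f, hf, hfx⟩
    have h1 := List.of_mem_filter hf
    rw [hfx] at h1
    simpa using h1
  have hrange : ∀ k ∈ ks, (0 : Int) ≤ k ∧ k < (cl.length : Int) :=
    fun k hk => hkeysmem k ((hmemks k).mp hk)
  have hiff : ∀ i : Nat, 0 ≤ i → i < cl.length → ((bounds.get? i).isSome ↔ (i : Int) ∈ ks) := by
    intro i _ _
    rw [hmemks i, ← PySem.Dict.contains_iff_mem_keys, PySem.Dict.contains_eq_isSome_get?]
  have hcongr : segs sep_at cl (0 : Int) = segs bounds cl (0 : Int) := by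
    apply segs_congr
    intro i h1 h2
    exact get?_full_eq_bounds fs (cl.length : Int) i ⟨h1, by simpa using h2⟩
  rw [hcongr]
  have hmain := pieces_eq_segs cl bounds ks 0 (by omega) hsort
    (fun k hk => ⟨by simpa using (hrange k hk).1, (hrange k hk).2⟩)
    (fun i h1 h2 => hiff i h1 h2)
  simpa using hmain.symm
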